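-- pv_equiv track=rewrite | github.com/ahir-chatterjee/league-analytics | riot-api/analysis.py | sortChampPool
-- ===== SOURCE A (Python) =====
-- def sortChampPool(champPool,recent,aggregate):
--     #Takes in a given champPool, a players recent plays, and a players aggregate plays, and sorts it
--     tuples = []
--     minRecentGames = 3  #minimum threshold for reaching the highRecentWeight
--     highRecentWeight = 4    #each game will be x5 as important.
--     recentWeight = 1    #each game will be x2 as important
--     for champ in champPool:
--         if(champ == "lanes"):
--             tuples.append((champ,-1))
--         weight = 0
--         if(champ in recent):
--             matches = recent[champ]["matches"]
--             if(matches >= minRecentGames):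
--                 weight += matches*highRecentWeight #guarantees at least minRecentGames*highRecentWeight of weight
--             else:
--                 weight += matches*recentWeight
--         assert champ in aggregate, champ + " was not found in aggregate."
--         weight += aggregate[champ]["matches"]
--         tuples.append((champ,weight))
--     tuples = sorted(tuples, key=lambda tuples: tuples[1], reverse=True)
--     champPool = []
--     fringe = False
--     fringeThreshold = minRecentGames*highRecentWeight #currently 12
--     for t in tuples:
--         if(not fringe):
--             if t[1] < fringeThreshold:
--                 champPool.append("")
--                 fringe = True
--         champPool.append(t[0])
--     return champPool
-- ===== SOURCE B (Python) =====
-- def sortChampPool(champPool, recent, aggregate):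
--     # B: no sorted() call and no fringe-flag loop: a single online pass that
--     # inserts each weighted entry stably into one of two descending buckets
--     # (strong: weight >= 12, weak: weight < 12), then concatenates with the
--     # "" marker before the weak bucket if it is non-empty.
--     strong, weak = [], []
--
--     def place(t):
--         bucket = strong if t[1] >= 12 else weak
--         for i, (_, w) in enumerate(bucket):
--             if w < t[1]:
--                 bucket.insert(i, t)
--                 return
--         bucket.append(t)
--
--     for champ in champPool:
--         if champ == "lanes":
--             place((champ, -1))
--         w = aggregate[champ]["matches"]
--         if champ in recent:
--             m = recent[champ]["matches"]
--             w += m * (4 if m >= 3 else 1)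
--         place((champ, w))
--
--     return [c for c, _ in strong] + ([""] + [c for c, _ in weak] if weak else [])
-- ===== Notes on version B (the rewrite author's own statement) =====
-- stated objective: alternative
-- what changed: A's sorted() call plus a stateful fringe-flag loop over the sorted tuples are replaced by a single online pass that stably inserts each weighted entry into one of two descending buckets (weight >= 12 vs < 12), so the final list is just strong-bucket names, then '' and the weak-bucket names if any.
import Mathlib
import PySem

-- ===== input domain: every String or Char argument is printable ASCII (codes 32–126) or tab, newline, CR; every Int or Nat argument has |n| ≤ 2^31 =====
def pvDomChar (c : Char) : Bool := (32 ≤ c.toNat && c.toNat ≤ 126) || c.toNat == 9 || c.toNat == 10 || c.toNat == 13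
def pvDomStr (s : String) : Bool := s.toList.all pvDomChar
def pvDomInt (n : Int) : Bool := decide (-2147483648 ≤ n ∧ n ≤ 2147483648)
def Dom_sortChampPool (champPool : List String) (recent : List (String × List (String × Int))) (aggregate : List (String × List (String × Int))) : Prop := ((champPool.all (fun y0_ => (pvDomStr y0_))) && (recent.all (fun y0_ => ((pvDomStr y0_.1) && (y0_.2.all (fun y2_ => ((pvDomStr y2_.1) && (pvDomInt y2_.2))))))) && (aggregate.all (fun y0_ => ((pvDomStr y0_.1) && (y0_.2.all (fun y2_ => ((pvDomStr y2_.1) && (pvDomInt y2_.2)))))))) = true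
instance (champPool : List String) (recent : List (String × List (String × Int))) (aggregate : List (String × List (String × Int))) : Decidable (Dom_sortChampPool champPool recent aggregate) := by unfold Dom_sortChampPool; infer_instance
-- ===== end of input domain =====

-- B replaces A's sorted() + stateful fringe-flag loop by a single online pass that
-- stably inserts each weighted entry into one of two descending buckets
-- (weight >= 12 vs < 12) and concatenates them with the "" marker (objective: alternative).


-- ===== PORT A =====
-- literal transliteration of A: build weighted tuples in a foldl (with the "lanes"
-- double append), sort (stable, descending by weight), then the fringe-flag loop;
-- dict lookups are first-match association-list lookups, with getD on fields that
-- Pre_ guarantees present.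
def sortChampPool (champPool : List String) (recent : List (String × List (String × Int))) (aggregate : List (String × List (String × Int))) : List String :=
  let minRecentGames : Int := 3
  let highRecentWeight : Int := 4
  let recentWeight : Int := 1
  let tuples : List (String × Int) := champPool.foldl (fun tuples champ =>
    let tuples := if champ == "lanes" then tuples ++ [(champ, (-1 : Int))] else tuples
    let weight : Int := 0
    let weight := match recent.lookup champ with
      | some r =>
        let mtc := ((r.lookup "matches").getD 0)
        if mtc ≥ minRecentGames then weight + mtc * highRecentWeight
        else weight + mtc * recentWeight
      | none => weight
    let weight := weight + (((aggregate.lookup champ).getD []).lookup "matches").getD 0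
    tuples ++ [(champ, weight)]) []
  let tuples := PySem.List.sorted tuples (fun t => t.2) true
  let fringeThreshold := minRecentGames * highRecentWeight
  let res := tuples.foldl (fun (st : List String × Bool) t =>
    if st.2 = false then
      if t.2 < fringeThreshold then (st.1 ++ [""] ++ [t.1], true)
      else (st.1 ++ [t.1], st.2)
    else (st.1 ++ [t.1], st.2)) ([], false)
  res.1

-- ===== PORT B =====
-- Source B's `place`: stable insertion into a weight-descending bucket (before the
-- first strictly smaller weight, i.e. after all ties)
def pvPlace (t : String × Int) : List (String × Int) → List (String × Int)
  | [] => [t]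
  | y :: ys => if y.2 < t.2 then t :: y :: ys else y :: pvPlace t ys

-- Source B's bucket choice: strong if weight >= 12, else weak
def pvPlace2 (t : String × Int) (st : List (String × Int) × List (String × Int)) :
    List (String × Int) × List (String × Int) :=
  if t.2 ≥ 12 then (pvPlace t st.1, st.2) else (st.1, pvPlace t st.2)

def sortChampPool_alt (champPool : List String) (recent : List (String × List (String × Int))) (aggregate : List (String × List (String × Int))) : List String :=
  let st := champPool.foldl (fun st champ =>
    let st := if champ == "lanes" then pvPlace2 (champ, (-1 : Int)) st else st
    let w := (((aggregate.lookup champ).getD []).lookup "matches").getD 0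
    let w := match recent.lookup champ with
      | some r =>
        let m := (r.lookup "matches").getD 0
        w + m * (if m ≥ 3 then 4 else 1)
      | none => w
    pvPlace2 (champ, w) st) ([], [])
  (st.1.map Prod.fst) ++ (if st.2.isEmpty then [] else "" :: st.2.map Prod.fst)

-- ===== PRECONDITION & SPEC =====
-- Pre_ excludes exactly the inputs where the Python A raises: a champ missing from
-- aggregate (AssertionError) or a present recent/aggregate record without a
-- "matches" key (KeyError).
def Pre_sortChampPool (champPool : List String) (recent : List (String × List (String × Int))) (aggregate : List (String × List (String × Int))) : Prop :=
  champPool.all (fun champ =>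
    (match aggregate.lookup champ with
      | some v => (v.lookup "matches").isSome
      | none => false) &&
    (match recent.lookup champ with
      | some r => (r.lookup "matches").isSome
      | none => true)) = true
instance (champPool : List String) (recent : List (String × List (String × Int))) (aggregate : List (String × List (String × Int))) : Decidable (Pre_sortChampPool champPool recent aggregate) := by unfold Pre_sortChampPool; infer_instance

def pvWitness_sortChampPool : List String × (List (String × List (String × Int))) × (List (String × List (String × Int))) :=
  (["lanes", "Ahri"], [("Ahri", [("matches", 5)])], [("lanes", [("matches", 2)]), ("Ahri", [("matches", 9)])])

def Spec_sortChampPool (champPool : List String) (recent : List (String × List (String × Int))) (aggregate : List (String × List (String × Int))) (out : List String) : Prop := out = sortChampPool_alt champPool recent aggregate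
instance (champPool : List String) (recent : List (String × List (String × Int))) (aggregate : List (String × List (String × Int))) (out : List String) : Decidable (Spec_sortChampPool champPool recent aggregate out) := by unfold Spec_sortChampPool; infer_instance

-- ===== CLAIM (what is proved, stated in full; the proofs are below) =====
def Claim_equal_sortChampPool : Prop := ∀ (champPool : List String) (recent : List (String × List (String × Int))) (aggregate : List (String × List (String × Int))), Dom_sortChampPool champPool recent aggregate → Pre_sortChampPool champPool recent aggregate → Spec_sortChampPool champPool recent aggregate (sortChampPool champPool recent aggregate)

-- ===== LEMMAS AND PROOFS =====

-- the per-champ weighted entries A appends for one champ ("lanes" double included);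
-- proof-only abbreviation tying both ports' per-champ work to one list
def pvEntries (recent aggregate : List (String × List (String × Int))) (champ : String) : List (String × Int) :=
  let w := (((aggregate.lookup champ).getD []).lookup "matches").getD 0
  let w := match recent.lookup champ with
    | some r =>
      let m := (r.lookup "matches").getD 0
      w + m * (if m ≥ 3 then 4 else 1)
    | none => w
  (if champ == "lanes" then [(champ, (-1 : Int))] else []) ++ [(champ, w)]

-- A's tuple-building foldl produces acc ++ flatMap of pvEntries
lemma tuples_eq (recent aggregate : List (String × List (String × Int))) :
    ∀ (l : List String) (acc : List (String × Int)),
      l.foldl (fun tuples champ =>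
        let tuples := if champ == "lanes" then tuples ++ [(champ, (-1 : Int))] else tuples
        let weight : Int := 0
        let weight := match recent.lookup champ with
          | some r =>
            let mtc := ((r.lookup "matches").getD 0)
            if mtc ≥ (3 : Int) then weight + mtc * 4
            else weight + mtc * 1
          | none => weight
        let weight := weight + (((aggregate.lookup champ).getD []).lookup "matches").getD 0
        tuples ++ [(champ, weight)]) acc
      = acc ++ l.flatMap (pvEntries recent aggregate) := by
  intro l
  induction l with
  | nil => intro acc; simp
  | cons c t ih =>
    intro acc
    simp only [List.foldl_cons, List.flatMap_cons, ih]
    rw [← List.append_assoc]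
    congr 1
    unfold pvEntries
    cases h : recent.lookup c with
    | none =>
      by_cases hl : (c == "lanes") = true <;> simp [hl]
    | some r =>
      by_cases hm : ((r.lookup "matches").getD 0) ≥ (3 : Int) <;>
      by_cases hl : (c == "lanes") = true <;>
        simp [hm, hl] <;> ring

-- B's foldl over champPool equals the entry-by-entry foldl of pvPlace2 over the flatMap
lemma alt_fold_eq (recent aggregate : List (String × List (String × Int))) :
    ∀ (l : List String) (st : List (String × Int) × List (String × Int)),
      l.foldl (fun st champ =>
        let st := if champ == "lanes" then pvPlace2 (champ, (-1 : Int)) st else st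
        let w := (((aggregate.lookup champ).getD []).lookup "matches").getD 0
        let w := match recent.lookup champ with
          | some r =>
            let m := (r.lookup "matches").getD 0
            w + m * (if m ≥ 3 then 4 else 1)
          | none => w
        pvPlace2 (champ, w) st) st
      = (l.flatMap (pvEntries recent aggregate)).foldl (fun st t => pvPlace2 t st) st := by
  intro l
  induction l with
  | nil => intro st; simp
  | cons c t ih =>
    intro st
    simp only [List.foldl_cons, List.flatMap_cons, List.foldl_append, ih]
    congr 1
    unfold pvEntries
    by_cases hl : (c == "lanes") = true <;>
    cases h : recent.lookup c <;> simp [hl]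

-- the pvPlace2 fold splits into two independent pvPlace folds over the filtered lists
lemma place2_split : ∀ (l : List (String × Int)) (s w : List (String × Int)),
    l.foldl (fun st t => pvPlace2 t st) (s, w)
    = ((l.filter (fun t => t.2 ≥ 12)).foldl (fun acc t => pvPlace t acc) s,
       (l.filter (fun t => t.2 < 12)).foldl (fun acc t => pvPlace t acc) w) := by
  intro l
  induction l with
  | nil => intro s w; simp
  | cons x t ih =>
    intro s w
    by_cases hx : x.2 ≥ (12 : Int)
    · have hx' : ¬ x.2 < (12 : Int) := by omega
      have h1 : pvPlace2 x (s, w) = (pvPlace x s, w) := by simp [pvPlace2, hx]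
      rw [List.foldl_cons, h1, ih]
      simp [hx, hx']
    · have hx' : x.2 < (12 : Int) := by omega
      have h1 : pvPlace2 x (s, w) = (s, pvPlace x w) := by simp [pvPlace2, hx]
      rw [List.foldl_cons, h1, ih]
      simp [hx, hx']

-- membership in pvPlace
lemma mem_pvPlace (x : String × Int) : ∀ (ys : List (String × Int)) (z : String × Int),
    z ∈ pvPlace x ys → z = x ∨ z ∈ ys := by
  intro ys
  induction ys with
  | nil => intro z hz; simpa [pvPlace] using hz
  | cons y t ih =>
    intro z hz
    by_cases h : y.2 < x.2
    · simp [pvPlace, h] at hz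
      rcases hz with hz | hz | hz
      · exact Or.inl hz
      · right; simp [hz]
      · right; simp [hz]
    · simp [pvPlace, h] at hz
      rcases hz with hz | hz
      · right; simp [hz]
      · rcases ih z hz with h' | h'
        · left; exact h'
        · right; simp [h']

-- pvPlace preserves the weight-descending invariant
lemma pvPlace_pairwise (x : String × Int) : ∀ (ys : List (String × Int)),
    ys.Pairwise (fun a b => b.2 ≤ a.2) → (pvPlace x ys).Pairwise (fun a b => b.2 ≤ a.2) := by
  intro ys
  induction ys with
  | nil => intro _; simp [pvPlace]
  | cons y t ih =>
    intro h
    rcases List.pairwise_cons.mp h with ⟨hy, ht⟩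
    by_cases hlt : y.2 < x.2
    · simp only [pvPlace, if_pos hlt]
      refine List.pairwise_cons.mpr ⟨?_, h⟩
      intro z hz
      rcases List.mem_cons.mp hz with rfl | hz
      · omega
      · have := hy z hz; omega
    · simp only [pvPlace, if_neg hlt]
      refine List.pairwise_cons.mpr ⟨?_, ih ht⟩
      intro z hz
      rcases mem_pvPlace x t z hz with rfl | hz
      · omega
      · exact hy z hz
-- filter drops an element pvPlace inserts when the predicate rejects it
lemma filter_pvPlace_neg (p : String × Int → Bool) (x : String × Int) (hx : p x = false) :
    ∀ (ys : List (String × Int)), (pvPlace x ys).filter p = ys.filter p := by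
  intro ys
  induction ys with
  | nil => simp [pvPlace, hx]
  | cons y t ih =>
    by_cases h : y.2 < x.2
    · simp [pvPlace, h, hx]
    · simp only [pvPlace, if_neg h]
      by_cases hp : p y = true <;> simp [hp, ih]

-- on a descending list, filter commutes with pvPlace of a kept element
lemma filter_pvPlace_pos (p : String × Int → Bool) (x : String × Int) (hx : p x = true) :
    ∀ (ys : List (String × Int)), ys.Pairwise (fun a b => b.2 ≤ a.2) →
      (pvPlace x ys).filter p = pvPlace x (ys.filter p) := by
  intro ys
  induction ys with
  | nil => simp [pvPlace, hx]
  | cons y t ih =>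
    intro h
    rcases List.pairwise_cons.mp h with ⟨hy, ht⟩
    by_cases hlt : y.2 < x.2
    · simp only [pvPlace, if_pos hlt]
      rw [List.filter_cons_of_pos hx]
      have hall : ∀ z ∈ (y :: t).filter p, z.2 < x.2 := by
        intro z hz
        rcases List.mem_cons.mp (List.mem_of_mem_filter hz) with rfl | hz'
        · exact hlt
        · have := hy z hz'; omega
      cases hf : (y :: t).filter p with
      | nil => simp [pvPlace]
      | cons z zs =>
        have hzlt : z.2 < x.2 := hall z (by rw [hf]; exact List.mem_cons_self)
        simp [pvPlace, hzlt]
    · simp only [pvPlace, if_neg hlt]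
      by_cases hp : p y = true
      · rw [List.filter_cons_of_pos hp, List.filter_cons_of_pos hp, ih ht]
        simp [pvPlace, hlt]
      · have hp' : p y = false := by simpa using hp
        rw [List.filter_cons_of_neg (by simp [hp']), List.filter_cons_of_neg (by simp [hp'])]
        exact ih ht

-- fold-level commute: filtering the result of the insert-fold is the insert-fold of
-- the filtered list, for any descending accumulator
lemma filter_fold_place (p : String × Int → Bool) :
    ∀ (l : List (String × Int)) (acc : List (String × Int)),
      acc.Pairwise (fun a b => b.2 ≤ a.2) →
      (l.foldl (fun acc t => pvPlace t acc) acc).filter p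
      = (l.filter p).foldl (fun acc t => pvPlace t acc) (acc.filter p) := by
  intro l
  induction l with
  | nil => intro acc _; simp
  | cons x t ih =>
    intro acc hacc
    have hacc' := pvPlace_pairwise x acc hacc
    by_cases hp : p x = true
    · rw [List.foldl_cons, List.filter_cons_of_pos hp, List.foldl_cons,
          ih _ hacc', filter_pvPlace_pos p x hp acc hacc]
    · have hp' : p x = false := by simpa using hp
      rw [List.foldl_cons, List.filter_cons_of_neg (by simp [hp']),
          ih _ hacc', filter_pvPlace_neg p x hp' acc]

-- PySem's descending stable sort IS the pvPlace insert-fold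
lemma sorted_eq_fold_place (l : List (String × Int)) :
    PySem.List.sorted l (fun t => t.2) true = l.foldl (fun acc t => pvPlace t acc) [] := by
  rw [PySem.List.sorted_rev_eq_foldl_insertBy]
  congr 1
  funext acc x
  induction acc with
  | nil => simp [pvPlace, PySem.List.insertBy]
  | cons y t ih => simp [pvPlace, PySem.List.insertBy, ih]

-- once the fringe flag is set, A's loop just appends the names
lemma fringe_true (l : List (String × Int)) : ∀ (acc : List String),
    (l.foldl (fun (st : List String × Bool) t =>
      if st.2 = false then
        if t.2 < (12 : Int) then (st.1 ++ [""] ++ [t.1], true)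
        else (st.1 ++ [t.1], st.2)
      else (st.1 ++ [t.1], st.2)) (acc, true)).1 = acc ++ l.map Prod.fst := by
  induction l with
  | nil => intro acc; simp
  | cons x t ih => intro acc; simpa using ih (acc ++ [x.1])

-- on a descending list, A's fringe loop is the split at the threshold
lemma fringe_split (l : List (String × Int))
    (h : l.Pairwise (fun a b => b.2 ≤ a.2)) : ∀ (acc : List String),
    (l.foldl (fun (st : List String × Bool) t =>
      if st.2 = false then
        if t.2 < (12 : Int) then (st.1 ++ [""] ++ [t.1], true)
        else (st.1 ++ [t.1], st.2)
      else (st.1 ++ [t.1], st.2)) (acc, false)).1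
    = acc ++ ((l.filter (fun t => t.2 ≥ 12)).map Prod.fst
        ++ (if ((l.filter (fun t => t.2 < 12)).map Prod.fst).isEmpty then []
            else "" :: (l.filter (fun t => t.2 < 12)).map Prod.fst)) := by
  induction l with
  | nil => intro acc; simp
  | cons x t ih =>
    rcases List.pairwise_cons.mp h with ⟨hx, ht⟩
    intro acc
    by_cases hlt : x.2 < (12 : Int)
    · have hall : ∀ y ∈ t, y.2 < (12 : Int) := fun y hy => lt_of_le_of_lt (hx y hy) hlt
      have hstrong : (x :: t).filter (fun t => t.2 ≥ 12) = [] := by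
        simp [List.filter_eq_nil_iff]
        constructor
        · omega
        · intro a b hab; have := hall (a, b) hab; omega
      have hweak : (x :: t).filter (fun t => t.2 < 12) = x :: t := by
        simp [List.filter_eq_self]
        constructor
        · omega
        · intro a b hab; have := hall (a, b) hab; omega
      simp only [List.foldl_cons, if_pos hlt, if_true]
      rw [fringe_true, hstrong, hweak]
      simp
    · have hge : x.2 ≥ (12 : Int) := by omega
      have hstrong : (x :: t).filter (fun t => t.2 ≥ 12)
          = x :: t.filter (fun t => t.2 ≥ 12) := by
        simp [hge]
      have hweak : (x :: t).filter (fun t => t.2 < 12) = t.filter (fun t => t.2 < 12) := by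
        simp [hlt]
      simp only [List.foldl_cons, if_neg hlt, if_true]
      rw [ih ht, hstrong, hweak]
      simp

-- ===== VERDICT (by name: the statement is the Claim_ definition above) =====
theorem sortChampPool_spec : Claim_equal_sortChampPool := by
  intro champPool recent aggregate _ _
  unfold Spec_sortChampPool sortChampPool sortChampPool_alt
  simp only
  rw [tuples_eq recent aggregate champPool [], alt_fold_eq recent aggregate champPool ([], [])]
  simp only [List.nil_append, show (3 : Int) * 4 = 12 by norm_num]
  rw [fringe_split _ (PySem.List.sorted_pairwise_rev _ _) []]
  rw [place2_split, sorted_eq_fold_place,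
      filter_fold_place (fun t => t.2 ≥ 12) _ [] List.Pairwise.nil,
      filter_fold_place (fun t => t.2 < 12) _ [] List.Pairwise.nil]
  simp
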